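-- pv_equiv track=rewrite | github.com/grupy-sanca/dojos | 039/3.py | insertDashII
-- ===== SOURCE A (Python) =====
-- def insertDashII(num):
--     pares = '2468'
--     impares = '13579'
--     res = ''
--     anterior = ''
--     for letter in str(num):
--
--         if letter in impares:
--             if anterior == 'impar':
--                 res += "-"
--             anterior = 'impar'
--         elif letter in pares:
--             if anterior == 'par':
--                 res += '*'
--             anterior = 'par'
--
--         else:
--             anterior = ''
--         res += letter
--     return res
-- ===== SOURCE B (Python) =====
-- def insertDashII(num):
--     def sep(a, b):
--         if a in '13579' and b in '13579':
--             return '-'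
--         if a in '2468' and b in '2468':
--             return '*'
--         return ''
--     def go(s):
--         if len(s) <= 1:
--             return s
--         return s[0] + sep(s[0], s[1]) + go(s[1:])
--     return go(str(num))
-- ===== Notes on version B (the rewrite author's own statement) =====
-- stated objective: simpler
-- what changed: Replaces A's stateful scan carrying a previous-parity flag string with a stateless pairwise recursion that inserts the separator by looking at each adjacent digit pair directly.
import Mathlib
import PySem

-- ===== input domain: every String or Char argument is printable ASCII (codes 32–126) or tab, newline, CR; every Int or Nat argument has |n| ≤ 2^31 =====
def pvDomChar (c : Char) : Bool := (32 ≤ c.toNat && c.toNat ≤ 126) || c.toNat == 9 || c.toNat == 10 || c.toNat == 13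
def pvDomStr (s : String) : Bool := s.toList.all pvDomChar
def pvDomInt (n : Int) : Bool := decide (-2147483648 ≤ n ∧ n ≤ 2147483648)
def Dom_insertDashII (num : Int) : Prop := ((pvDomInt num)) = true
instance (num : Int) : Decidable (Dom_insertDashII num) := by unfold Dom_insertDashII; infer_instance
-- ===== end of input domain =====

-- B replaces A's stateful previous-parity-flag scan with a stateless pairwise recursion (simpler); same return value.

-- ===== PORT A =====
-- state: res (accumulated chars), anterior ∈ {"impar","par",""} exactly as in the Python
def insertDashII_loop : List Char → List Char → String → List Char
  | [], res, _ => res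
  | letter :: rest, res, anterior =>
    if ['1','3','5','7','9'].contains letter then
      insertDashII_loop rest ((if anterior == "impar" then res ++ ['-'] else res) ++ [letter]) "impar"
    else if ['2','4','6','8'].contains letter then
      insertDashII_loop rest ((if anterior == "par" then res ++ ['*'] else res) ++ [letter]) "par"
    else
      insertDashII_loop rest (res ++ [letter]) ""

def insertDashII (num : Int) : String :=
  String.ofList (insertDashII_loop (PySem.Int.toChars num) [] "")

-- ===== PORT B =====
def sepB (a b : Char) : List Char :=
  if ['1','3','5','7','9'].contains a && ['1','3','5','7','9'].contains b then ['-']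
  else if ['2','4','6','8'].contains a && ['2','4','6','8'].contains b then ['*']
  else []

def goB : List Char → List Char
  | [] => []
  | [a] => [a]
  | a :: b :: r => a :: (sepB a b ++ goB (b :: r))

def insertDashII_alt (num : Int) : String :=
  String.ofList (goB (PySem.Int.toChars num))

-- ===== PRECONDITION & SPEC =====
def Spec_insertDashII (num : Int) (out : String) : Prop := out = insertDashII_alt num
instance (num : Int) (out : String) : Decidable (Spec_insertDashII num out) := by unfold Spec_insertDashII; infer_instance

-- ===== CLAIM (what is proved, stated in full; the proofs are below) =====
def Claim_equal_insertDashII : Prop := ∀ (num : Int), Dom_insertDashII num → Spec_insertDashII num (insertDashII num)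

-- ===== LEMMAS AND PROOFS =====

-- separator the loop would emit before the first char of l, given the incoming state
def leadSep (ant : String) : List Char → List Char
  | [] => []
  | c :: _ =>
    if ant == "impar" && ['1','3','5','7','9'].contains c then ['-']
    else if ant == "par" && ['2','4','6','8'].contains c then ['*']
    else []

theorem odd_not_even (c : Char) (h : ['1','3','5','7','9'].contains c = true) :
    ['2','4','6','8'].contains c = false := by
  simp only [List.contains_eq_mem, List.mem_cons, List.not_mem_nil, or_false, decide_eq_true_eq,
    decide_eq_false_iff_not] at h ⊢
  rcases h with h|h|h|h|h <;> subst h <;> decide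

theorem even_not_odd (c : Char) (h : ['2','4','6','8'].contains c = true) :
    ['1','3','5','7','9'].contains c = false := by
  simp only [List.contains_eq_mem, List.mem_cons, List.not_mem_nil, or_false, decide_eq_true_eq,
    decide_eq_false_iff_not] at h ⊢
  rcases h with h|h|h|h <;> subst h <;> decide

theorem loop_cons (c : Char) (rest res : List Char) (ant : String) :
    insertDashII_loop (c :: rest) res ant =
      (if ['1','3','5','7','9'].contains c then
        insertDashII_loop rest ((if ant == "impar" then res ++ ['-'] else res) ++ [c]) "impar"
      else if ['2','4','6','8'].contains c then
        insertDashII_loop rest ((if ant == "par" then res ++ ['*'] else res) ++ [c]) "par"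
      else insertDashII_loop rest (res ++ [c]) "") := rfl

theorem loop_eq (l : List Char) : ∀ (res : List Char) (ant : String),
    insertDashII_loop l res ant = res ++ leadSep ant l ++ goB l := by
  induction l with
  | nil => intro res ant; simp [insertDashII_loop, leadSep, goB]
  | cons c rest ih =>
    intro res ant
    rw [loop_cons]
    by_cases h1 : (['1','3','5','7','9'].contains c) = true
    · rw [if_pos h1, ih]
      cases rest with
      | nil => split_ifs <;> simp_all [leadSep, goB, odd_not_even c h1, -List.contains_eq_mem]
      | cons b r => split_ifs <;> simp_all [leadSep, goB, sepB, odd_not_even c h1, -List.contains_eq_mem]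
    · rw [if_neg h1]
      by_cases h2 : (['2','4','6','8'].contains c) = true
      · rw [if_pos h2, ih]
        cases rest with
        | nil => split_ifs <;> simp_all [leadSep, goB, even_not_odd c h2, -List.contains_eq_mem]
        | cons b r => split_ifs <;> simp_all [leadSep, goB, sepB, even_not_odd c h2, -List.contains_eq_mem]
      · rw [if_neg h2, ih]
        cases rest with
        | nil => simp_all [leadSep, goB, -List.contains_eq_mem]
        | cons b r => simp_all [leadSep, goB, sepB, -List.contains_eq_mem]

-- ===== VERDICT (by name: the statement is the Claim_ definition above) =====
theorem insertDashII_spec : Claim_equal_insertDashII := by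
  intro num _
  unfold Spec_insertDashII insertDashII insertDashII_alt
  rw [loop_eq]
  cases PySem.Int.toChars num <;> simp [leadSep]
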